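-- pv_equiv track=rewrite | github.com/chuksoo/CodeMasters | TIP102 - Intermediate Technical Interview Prep/Unit 3 practice.py | min_remaining_watchlist
-- ===== SOURCE A (Python) =====
-- def min_remaining_watchlist(watchlist):
--     modified_watch_list = []
--     for char in watchlist:
--         if modified_watch_list and modified_watch_list[-1] == 'A' and char == 'B':
--             modified_watch_list.pop()
--         elif modified_watch_list and modified_watch_list[-1] == 'C' and char == 'D':
--             modified_watch_list.pop()
--         else:
--             modified_watch_list.append(char)
--     return len(modified_watch_list)
-- ===== SOURCE B (Python) =====
-- def min_remaining_watchlist(watchlist):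
--     items = list(watchlist)
--     changed = True
--     while changed:
--         changed = False
--         new = []
--         i = 0
--         while i < len(items):
--             if i + 1 < len(items) and ((items[i] == 'A' and items[i + 1] == 'B')
--                                        or (items[i] == 'C' and items[i + 1] == 'D')):
--                 changed = True
--                 i += 2
--             else:
--                 new.append(items[i])
--                 i += 1
--         items = new
--     return len(items)
-- ===== Notes on version B (the rewrite author's own statement) =====
-- stated objective: alternative
-- what changed: Replaces the one-pass stack with repeated left-to-right scans that delete non-overlapping adjacent A-before-B / C-before-D pairs and rebuild the list until a scan removes nothing; the rewrite system is confluent, so the same normal form (and length) is reached.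
import Mathlib
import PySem

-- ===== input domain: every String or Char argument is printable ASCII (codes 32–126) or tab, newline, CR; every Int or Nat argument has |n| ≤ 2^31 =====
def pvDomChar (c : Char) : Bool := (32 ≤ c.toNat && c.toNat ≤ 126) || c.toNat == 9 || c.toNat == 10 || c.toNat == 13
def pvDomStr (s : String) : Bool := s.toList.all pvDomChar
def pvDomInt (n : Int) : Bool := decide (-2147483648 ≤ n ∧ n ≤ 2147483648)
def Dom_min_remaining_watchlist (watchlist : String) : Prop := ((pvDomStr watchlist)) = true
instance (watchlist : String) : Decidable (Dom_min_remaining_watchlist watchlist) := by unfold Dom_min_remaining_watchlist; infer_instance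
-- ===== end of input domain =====

-- B replaces A's single stack pass by repeated scans deleting adjacent 'AB'/'CD' pairs until
-- a fixpoint; same return value (the rewriting is confluent), no speed claim.

-- ===== PORT A =====
-- one stack-push/pop step of A's loop body (branches in A's order)
def pvStep (acc : List Char) (c : Char) : List Char :=
  if acc ≠ [] ∧ acc.getLast? = some 'A' ∧ c = 'B' then acc.dropLast
  else if acc ≠ [] ∧ acc.getLast? = some 'C' ∧ c = 'D' then acc.dropLast
  else acc ++ [c]

def min_remaining_watchlist (watchlist : String) : Int :=
  ((watchlist.toList.foldl pvStep []).length : Int)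

-- ===== PORT B =====
-- one rebuilding scan: returns (rebuilt list, changed flag)
def pvPass : List Char → List Char × Bool
  | [] => ([], false)
  | a :: b :: t =>
    if (a = 'A' ∧ b = 'B') ∨ (a = 'C' ∧ b = 'D') then
      ((pvPass t).1, true)
    else
      (a :: (pvPass (b :: t)).1, (pvPass (b :: t)).2)
  | [a] => ([a], false)

theorem pvPass_len (l : List Char) :
    (pvPass l).1.length ≤ l.length ∧ ((pvPass l).2 = true → (pvPass l).1.length < l.length) := by
  induction l using pvPass.induct with
  | case1 => simp [pvPass]
  | case2 a b t h ih =>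
      obtain ⟨ih1, ih2⟩ := ih
      rw [pvPass, if_pos h]
      refine ⟨?_, fun _ => ?_⟩ <;> simp only [List.length_cons] <;> omega
  | case3 a b t h ih =>
      obtain ⟨ih1, ih2⟩ := ih
      rw [pvPass, if_neg h]
      dsimp only
      refine ⟨?_, fun hc => ?_⟩
      · simp only [List.length_cons] at ih1 ⊢; omega
      · have h2 := ih2 hc
        simp only [List.length_cons] at h2 ⊢; omega
  | case4 a => simp [pvPass]

def pvLoop (l : List Char) : List Char :=
  if (pvPass l).2 then pvLoop (pvPass l).1 else (pvPass l).1
termination_by l.length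
decreasing_by exact (pvPass_len l).2 (by assumption)

def min_remaining_watchlist_alt (watchlist : String) : Int :=
  ((pvLoop watchlist.toList).length : Int)

-- ===== PRECONDITION & SPEC =====
def Spec_min_remaining_watchlist (watchlist : String) (out : Int) : Prop := out = min_remaining_watchlist_alt watchlist
instance (watchlist : String) (out : Int) : Decidable (Spec_min_remaining_watchlist watchlist out) := by unfold Spec_min_remaining_watchlist; infer_instance

-- ===== CLAIM (what is proved, stated in full; the proofs are below) =====
def Claim_equal_min_remaining_watchlist : Prop := ∀ (watchlist : String), Dom_min_remaining_watchlist watchlist → Spec_min_remaining_watchlist watchlist (min_remaining_watchlist watchlist)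

-- ===== LEMMAS AND PROOFS =====

-- "no adjacent AB/CD pair" relation
def pvR (a b : Char) : Prop := ¬(a = 'A' ∧ b = 'B') ∧ ¬(a = 'C' ∧ b = 'D')

theorem pvStep_push (s : List Char) (c : Char)
    (h : ∀ a, s.getLast? = some a → pvR a c) : pvStep s c = s ++ [c] := by
  unfold pvStep
  rcases hs : s.getLast? with _ | a
  · cases s with
    | nil => simp
    | cons x t => simp at hs
  · have hr := h a hs
    rw [if_neg, if_neg]
    · rintro ⟨-, h1, h2⟩
      exact hr.2 ⟨Option.some.inj h1, h2⟩
    · rintro ⟨-, h1, h2⟩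
      exact hr.1 ⟨Option.some.inj h1, h2⟩

theorem pvStep_A (s : List Char) : pvStep s 'A' = s ++ ['A'] := by
  apply pvStep_push
  intro a _
  exact ⟨fun h => by exact absurd h.2 (by decide), fun h => by exact absurd h.2 (by decide)⟩

theorem pvStep_C (s : List Char) : pvStep s 'C' = s ++ ['C'] := by
  apply pvStep_push
  intro a _
  exact ⟨fun h => by exact absurd h.2 (by decide), fun h => by exact absurd h.2 (by decide)⟩

theorem pvStep_AB (s : List Char) : pvStep (s ++ ['A']) 'B' = s := by
  unfold pvStep
  rw [if_pos] <;> simp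

theorem pvStep_CD (s : List Char) : pvStep (s ++ ['C']) 'D' = s := by
  unfold pvStep
  rw [if_neg, if_pos] <;> simp

-- one pass preserves the stack normal form
theorem pvPass_foldl (l : List Char) :
    ∀ s : List Char, (pvPass l).1.foldl pvStep s = l.foldl pvStep s := by
  induction l using pvPass.induct with
  | case1 => intro s; rfl
  | case2 a b t h ih =>
      intro s
      rw [pvPass, if_pos h]
      rcases h with ⟨hA, hB⟩ | ⟨hC, hD⟩
      · subst hA hB
        rw [ih s, List.foldl_cons, List.foldl_cons, pvStep_A, pvStep_AB]
      · subst hC hD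
        rw [ih s, List.foldl_cons, List.foldl_cons, pvStep_C, pvStep_CD]
  | case3 a b t h ih =>
      intro s
      rw [pvPass, if_neg h, List.foldl_cons, List.foldl_cons]
      exact ih (pvStep s a)
  | case4 a => intro s; rfl

-- a pass that changes nothing returns its input, which has no adjacent pair
theorem pvPass_fix (l : List Char) (h : (pvPass l).2 = false) :
    (pvPass l).1 = l ∧ List.IsChain pvR l := by
  induction l using pvPass.induct with
  | case1 => exact ⟨rfl, .nil⟩
  | case2 a b t hp ih => rw [pvPass, if_pos hp] at h; simp at h
  | case3 a b t hp ih =>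
      rw [pvPass, if_neg hp] at h ⊢
      obtain ⟨h1, h2⟩ := ih h
      refine ⟨by rw [h1], ?_⟩
      rw [List.isChain_cons_cons]
      exact ⟨⟨fun hx => hp (Or.inl hx), fun hx => hp (Or.inr hx)⟩, h2⟩
  | case4 a => exact ⟨rfl, .singleton a⟩

-- a pair-free list passes through the stack unchanged
theorem pv_foldl_irred (l : List Char) :
    ∀ s : List Char, List.IsChain pvR (s ++ l) → l.foldl pvStep s = s ++ l := by
  induction l with
  | nil => intro s _; simp
  | cons x t ih =>
      intro s h
      have hstep : pvStep s x = s ++ [x] := by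
        apply pvStep_push
        intro a ha
        exact (List.isChain_append.1 h).2.2 a ha x rfl
      rw [List.foldl_cons, hstep]
      have := ih (s ++ [x]) (by simpa using h)
      rw [this]
      simp

theorem pvLoop_eq (l : List Char) : pvLoop l = l.foldl pvStep [] := by
  induction l using pvLoop.induct with
  | case1 l hc ih =>
      rw [pvLoop, if_pos hc, ih, pvPass_foldl]
  | case2 l hc =>
      obtain ⟨h1, h2⟩ := pvPass_fix l (Bool.not_eq_true _ ▸ (by simpa using hc))
      rw [pvLoop, if_neg hc, h1, pv_foldl_irred l [] (by simpa using h2)]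
      simp

-- ===== VERDICT (by name: the statement is the Claim_ definition above) =====
theorem min_remaining_watchlist_spec : Claim_equal_min_remaining_watchlist := by
  intro w _
  unfold Spec_min_remaining_watchlist min_remaining_watchlist min_remaining_watchlist_alt
  rw [pvLoop_eq]
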